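-- pv_equiv track=rewrite | github.com/MichaelWehar/FourCornersProblem | python/lemma_2_case_1011_wip.py | lemma2Exists
-- ===== SOURCE A (Python) =====
-- def createNextRightMap(m, n, matrix):
--     # Create the nextOneRight map with row-wise traversal
--     #need to initialize this array, otherwise
--     #we get "list assignment index out of range" error
--     nextOneRight = [None for _ in range(m * n)]
--     for i in range(m):
--         foundOneYet = False
--         #we won't be able to map the first 1 we find in a row until
--         #we find its closest neighbor to the right
--         prevEntry = [None for _ in range(2)]
--         #prevEntry needs to be inside the first for loop so it can't be
--         #something from the above row. also needs to be initialized so we can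
--         #index into it
--         for j in range(n):
--             nextOneRight[i * n + j] = -1
--             if matrix[i][j] == True:
--                 if foundOneYet:
--                     prevRowIndex = prevEntry[0]
--                     prevColIndex = prevEntry[1]
--                     nextOneRight[prevRowIndex * n + prevColIndex] = j
--                     prevEntry = [i, j]
--                 else:
--                     #if this is the first one we find, don't add anything
--                     #to the mapping yet
--                     foundOneYet = True
--                     prevEntry = [i, j]
--     return nextOneRight
--
-- def createNextDownMap(m, n, matrix):
--     nextOneDown = [None for _ in range(m * n)]
--     for j in range(n):
--         foundOneYet = False
--         prevEntry = [None, None]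
--         for i in range(m):
--             nextOneDown[i * n + j] = -1
--             if matrix[i][j] == True:
--                 if foundOneYet:
--                     prevRowIndex = prevEntry[0]
--                     prevColIndex = prevEntry[1]
--                     nextOneDown[prevRowIndex * n + prevColIndex] = i
--                     prevEntry = [i, j]
--                 else:
--                     foundOneYet = True
--                     prevEntry = [i, j]
--     return nextOneDown
--
-- def lemma2Exists(m, n, matrix):
--
--     # Map any location of a 1 such as (i, j) to the next location of a 1
--     # to the right or down
--     nextOneRight = createNextRightMap(m, n, matrix)
--     nextOneDown = createNextDownMap(m, n, matrix)
--
--     # Search for 1011 submatrix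
--     for topRow in range(m):
--         for leftCol in range(n):
--             if matrix[topRow][leftCol] == True:
--                 bottomRow = nextOneDown[topRow * n + leftCol]
--                 if bottomRow != -1 and matrix[bottomRow][leftCol] == True:
--                     rightCol = nextOneRight[bottomRow * n + leftCol]
--                     if rightCol != -1 and matrix[bottomRow][rightCol] == True and matrix[topRow][rightCol] == False:
--                         return True
--     return False
-- ===== SOURCE B (Python) =====
-- def lemma2Exists(m, n, matrix):
--     # On-the-fly search: no precomputed nearest-neighbor maps.
--     for topRow in range(m):
--         for leftCol in range(n):
--             if matrix[topRow][leftCol] != True: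
--                 continue
--             # first 1 strictly below (topRow, leftCol) in the same column
--             bottomRow = next((i for i in range(topRow + 1, m)
--                               if matrix[i][leftCol] == True), None)
--             if bottomRow is None:
--                 continue
--             # first 1 strictly to the right of (bottomRow, leftCol) in that row
--             rightCol = next((j for j in range(leftCol + 1, n)
--                              if matrix[bottomRow][j] == True), None)
--             if rightCol is None:
--                 continue
--             if matrix[topRow][rightCol] == False:
--                 return True
--     return False
-- ===== Notes on version B (the rewrite author's own statement) =====
-- stated objective: simpler
-- what changed: Dropped the two precomputed nearest-one lookup tables (createNextRightMap/createNextDownMap with their flat m*n arrays and prev-entry bookkeeping); B finds the first 1 below and then the first 1 to the right on the fly with next() over a range, directly inside the double loop.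
import Mathlib
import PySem

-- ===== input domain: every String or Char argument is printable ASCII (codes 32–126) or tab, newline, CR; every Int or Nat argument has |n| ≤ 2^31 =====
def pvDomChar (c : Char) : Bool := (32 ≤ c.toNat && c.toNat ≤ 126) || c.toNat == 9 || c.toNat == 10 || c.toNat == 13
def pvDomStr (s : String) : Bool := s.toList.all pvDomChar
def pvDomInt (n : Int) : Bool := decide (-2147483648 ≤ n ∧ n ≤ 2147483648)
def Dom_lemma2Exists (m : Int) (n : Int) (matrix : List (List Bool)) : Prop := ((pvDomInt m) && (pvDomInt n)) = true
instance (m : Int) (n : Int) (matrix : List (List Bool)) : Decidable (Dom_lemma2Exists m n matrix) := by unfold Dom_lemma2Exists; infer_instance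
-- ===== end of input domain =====

-- B drops A's two precomputed nearest-one tables and finds the first 1 below / first 1 to the
-- right on the fly (objective: simpler).

-- matrix[i][j] (IndexError excluded by Pre_)
def pvGet (matrix : List (List Bool)) (i j : Int) : Bool :=
  PySem.List.pyGetD (PySem.List.pyGetD matrix i []) j false

-- ===== PORT A =====
-- inner-loop body of createNextRightMap; state = (nextOneRight, foundOneYet, prevEntry)
-- (Python's prevEntry starts as [None, None]; it is read only after being assigned, ported as (0, 0))
def rBody (n : Int) (matrix : List (List Bool)) (i : Int)
    (st : List Int × Bool × Int × Int) (j : Int) : List Int × Bool × Int × Int :=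
  let arr := PySem.List.pySetD st.1 (i * n + j) (-1)
  if pvGet matrix i j == true then
    if st.2.1 then
      (PySem.List.pySetD arr (st.2.2.1 * n + st.2.2.2) j, true, i, j)
    else
      (arr, true, i, j)
  else
    (arr, st.2.1, st.2.2)

-- Python initializes the flat array with None; every cell that is ever read has been assigned
-- first, so the never-read initial value is ported as -1.
def createNextRightMap (m n : Int) (matrix : List (List Bool)) : List Int :=
  (PySem.List.pyRange 0 m 1).foldl
    (fun nextOneRight i =>
      ((PySem.List.pyRange 0 n 1).foldl (rBody n matrix i) (nextOneRight, false, 0, 0)).1)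
    (List.replicate (m * n).toNat (-1))

-- inner-loop body of createNextDownMap; state = (nextOneDown, foundOneYet, prevEntry)
def dBody (n : Int) (matrix : List (List Bool)) (j : Int)
    (st : List Int × Bool × Int × Int) (i : Int) : List Int × Bool × Int × Int :=
  let arr := PySem.List.pySetD st.1 (i * n + j) (-1)
  if pvGet matrix i j == true then
    if st.2.1 then
      (PySem.List.pySetD arr (st.2.2.1 * n + st.2.2.2) i, true, i, j)
    else
      (arr, true, i, j)
  else
    (arr, st.2.1, st.2.2)

def createNextDownMap (m n : Int) (matrix : List (List Bool)) : List Int :=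
  (PySem.List.pyRange 0 n 1).foldl
    (fun nextOneDown j =>
      ((PySem.List.pyRange 0 m 1).foldl (dBody n matrix j) (nextOneDown, false, 0, 0)).1)
    (List.replicate (m * n).toNat (-1))

def lemma2Exists (m : Int) (n : Int) (matrix : List (List Bool)) : Bool :=
  let nextOneRight := createNextRightMap m n matrix
  let nextOneDown := createNextDownMap m n matrix
  (PySem.List.pyRange 0 m 1).any fun topRow =>
    (PySem.List.pyRange 0 n 1).any fun leftCol =>
      if pvGet matrix topRow leftCol == true then
        let bottomRow := PySem.List.pyGetD nextOneDown (topRow * n + leftCol) (-1)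
        if bottomRow != -1 && (pvGet matrix bottomRow leftCol == true) then
          let rightCol := PySem.List.pyGetD nextOneRight (bottomRow * n + leftCol) (-1)
          rightCol != -1 && (pvGet matrix bottomRow rightCol == true) && !(pvGet matrix topRow rightCol)
        else false
      else false

-- ===== PORT B =====
def lemma2Exists_alt (m : Int) (n : Int) (matrix : List (List Bool)) : Bool :=
  (PySem.List.pyRange 0 m 1).any fun topRow =>
    (PySem.List.pyRange 0 n 1).any fun leftCol =>
      pvGet matrix topRow leftCol &&
        (match (PySem.List.pyRange (topRow + 1) m 1).find? (fun i => pvGet matrix i leftCol) with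
         | none => false
         | some bottomRow =>
           match (PySem.List.pyRange (leftCol + 1) n 1).find? (fun j => pvGet matrix bottomRow j) with
           | none => false
           | some rightCol => !(pvGet matrix topRow rightCol))

-- ===== PRECONDITION & SPEC =====
-- Pre_: exactly where the Python A returns normally — when both loop bounds are positive the
-- matrix must have at least m rows each of length at least n (else A raises IndexError).
def Pre_lemma2Exists (m : Int) (n : Int) (matrix : List (List Bool)) : Prop :=
  (0 < m ∧ 0 < n) → (m ≤ (matrix.length : Int) ∧ ∀ row ∈ matrix.take m.toNat, n ≤ (row.length : Int))
instance (m : Int) (n : Int) (matrix : List (List Bool)) : Decidable (Pre_lemma2Exists m n matrix) := by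
  unfold Pre_lemma2Exists; infer_instance

def pvWitness_lemma2Exists : Int × Int × List (List Bool) :=
  (2, 2, [[true, false], [true, true]])

def Spec_lemma2Exists (m : Int) (n : Int) (matrix : List (List Bool)) (out : Bool) : Prop :=
  out = lemma2Exists_alt m n matrix
instance (m : Int) (n : Int) (matrix : List (List Bool)) (out : Bool) : Decidable (Spec_lemma2Exists m n matrix out) := by
  unfold Spec_lemma2Exists; infer_instance

-- ===== CLAIM (what is proved, stated in full; the proofs are below) =====
def Claim_equal_lemma2Exists : Prop := ∀ (m : Int) (n : Int) (matrix : List (List Bool)), Dom_lemma2Exists m n matrix → Pre_lemma2Exists m n matrix → Spec_lemma2Exists m n matrix (lemma2Exists m n matrix)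

-- ===== LEMMAS AND PROOFS =====

-- value B computes as "first 1 to the right of (i, j)" (or -1)
def rightVal (n : Int) (matrix : List (List Bool)) (i j : Int) : Int :=
  match (PySem.List.pyRange (j + 1) n 1).find? (fun j' => pvGet matrix i j') with
  | some j' => j'
  | none => -1

-- value B computes as "first 1 below (i, j)" (or -1)
def downVal (m : Int) (matrix : List (List Bool)) (i j : Int) : Int :=
  match (PySem.List.pyRange (i + 1) m 1).find? (fun i' => pvGet matrix i' j) with
  | some i' => i'
  | none => -1

theorem getD_setD (xs : List Int) {s : Int} (t : Int) (v d : Int)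
    (hs0 : 0 ≤ s) (hslen : s < (xs.length : Int)) (ht0 : 0 ≤ t) :
    PySem.List.pyGetD (PySem.List.pySetD xs s v) t d = if t = s then v else PySem.List.pyGetD xs t d := by
  rw [PySem.List.pySetD_of_nonneg xs v hs0, PySem.List.pyGetD_of_nonneg _ d ht0,
      PySem.List.pyGetD_of_nonneg xs d ht0]
  have hs : s.toNat < xs.length := by omega
  by_cases h : t = s
  · have h' : t.toNat = s.toNat := by omega
    simp [h, List.getD, hs]
  · have h' : ¬ (t.toNat = s.toNat) := by omega
    simp [h, List.getD, Ne.symm h']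

theorem r_len (n : Int) (matrix : List (List Bool)) (i : Int) (k : Nat) :
    ∀ (j0 : Int) (st : List Int × Bool × Int × Int), (n - j0).toNat = k →
    ((PySem.List.pyRange j0 n 1).foldl (rBody n matrix i) st).1.length = st.1.length := by
  induction k with
  | zero =>
    intro j0 st hk
    rw [PySem.List.pyRange_one_eq_nil (by omega)]
    rfl
  | succ k ih =>
    intro j0 st hk
    rw [PySem.List.pyRange_one_cons (show j0 < n by omega), List.foldl_cons]
    rw [ih (j0 + 1) _ (by omega)]
    obtain ⟨arr, found, pi, pj⟩ := st
    simp only [rBody]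
    split
    · split <;> simp [PySem.List.length_pySetD]
    · simp [PySem.List.length_pySetD]

theorem r_past (n : Int) (matrix : List (List Bool)) (i : Int) (k : Nat) :
    ∀ (j0 jt : Int) (arr : List Int) (found : Bool) (pr pc : Int),
    (n - j0).toNat = k → 0 ≤ i → 0 ≤ j0 → 0 ≤ jt → jt < j0 →
    (found = true → pr = i ∧ 0 ≤ pc ∧ pc < j0) →
    (i + 1) * n ≤ (arr.length : Int) →
    PySem.List.pyGetD ((PySem.List.pyRange j0 n 1).foldl (rBody n matrix i) (arr, found, pr, pc)).1 (i * n + jt) (-1) =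
      if found = true ∧ pc = jt then
        (match (PySem.List.pyRange j0 n 1).find? (fun j' => pvGet matrix i j') with
         | some j' => j'
         | none => PySem.List.pyGetD arr (i * n + jt) (-1))
      else PySem.List.pyGetD arr (i * n + jt) (-1) := by
  induction k with
  | zero =>
    intro j0 jt arr found pr pc hk hi hj0 hjt hlt hinv hlen
    rw [PySem.List.pyRange_one_eq_nil (by omega)]
    simp only [List.foldl_nil, List.find?_nil]
    split <;> rfl
  | succ k ih =>
    intro j0 jt arr found pr pc hk hi hj0 hjt hlt hinv hlen
    have hj0n : j0 < n := by omega
    have hwr : i * n + j0 < (arr.length : Int) := by nlinarith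
    have ht0 : 0 ≤ i * n + jt := by nlinarith
    rw [PySem.List.pyRange_one_cons hj0n, List.foldl_cons]
    simp only [rBody]
    by_cases hg : pvGet matrix i j0 = true
    · simp only [hg, beq_self_eq_true, if_true]
      by_cases hf : found = true
      · -- prev-write happens
        obtain ⟨hpr, hpc0, hpclt⟩ := hinv hf
        have hwp : i * n + pc < ((PySem.List.pySetD arr (i * n + j0) (-1)).length : Int) := by
          rw [PySem.List.length_pySetD]; nlinarith
        simp only [hf, if_true, hpr]
        rw [ih (j0 + 1) jt _ true i j0 (by omega) hi (by omega) hjt (by omega)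
            (fun _ => ⟨rfl, by omega, by omega⟩)
            (by rw [PySem.List.length_pySetD, PySem.List.length_pySetD]; exact hlen)]
        have hne : ¬ (j0 = jt) := by omega
        simp only [hne, and_false, if_false]
        rw [getD_setD _ _ _ _ (by nlinarith) hwp ht0,
            getD_setD _ _ _ _ (by nlinarith) (by exact_mod_cast hwr) ht0]
        have h2 : ¬ (i * n + jt = i * n + j0) := by omega
        rw [List.find?_cons_of_pos (by simpa using hg)]
        simp only [h2, if_false]
        by_cases hc : pc = jt
        · have h1 : i * n + jt = i * n + pc := by omega
          simp [h1, hc, hf]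
        · have h1 : ¬ (i * n + jt = i * n + pc) := by omega
          simp [h1, hc, hf]
      · -- first one found
        simp only [hf, Bool.false_eq_true, if_false]
        rw [ih (j0 + 1) jt _ true i j0 (by omega) hi (by omega) hjt (by omega)
            (fun _ => ⟨rfl, by omega, by omega⟩)
            (by rw [PySem.List.length_pySetD]; exact hlen)]
        have hne : ¬ (j0 = jt) := by omega
        simp only [hne, and_false, if_false]
        rw [getD_setD _ _ _ _ (by nlinarith) (by exact_mod_cast hwr) ht0]
        have h2 : ¬ (i * n + jt = i * n + j0) := by omega
        simp only [h2, if_false]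
        rw [List.find?_cons_of_pos (by simpa using hg)]
        simp [hf]
    · rw [Bool.not_eq_true] at hg
      simp only [beq_iff_eq, hg, Bool.false_eq_true, if_false]
      rw [ih (j0 + 1) jt _ found pr pc (by omega) hi (by omega) hjt (by omega)
          (fun h => by obtain ⟨a, b, c⟩ := hinv h; exact ⟨a, b, by omega⟩)
          (by rw [PySem.List.length_pySetD]; exact hlen)]
      rw [getD_setD _ _ _ _ (by nlinarith) (by exact_mod_cast hwr) ht0]
      have h2 : ¬ (i * n + jt = i * n + j0) := by omega
      simp only [h2, if_false]
      rw [List.find?_cons_of_neg (by simp [pvGet] at hg ⊢; simp [hg])]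

theorem getD_setD_ne (xs : List Int) {s : Int} (t : Int) (v d : Int)
    (hs0 : 0 ≤ s) (ht0 : 0 ≤ t) (hne : t ≠ s) :
    PySem.List.pyGetD (PySem.List.pySetD xs s v) t d = PySem.List.pyGetD xs t d := by
  rw [PySem.List.pySetD_of_nonneg xs v hs0, PySem.List.pyGetD_of_nonneg _ d ht0,
      PySem.List.pyGetD_of_nonneg xs d ht0]
  have : ¬ (s.toNat = t.toNat) := by omega
  simp [List.getD, List.getElem?_set, this]

theorem r_main (n : Int) (matrix : List (List Bool)) (i : Int) (k : Nat) :
    ∀ (j0 jt : Int) (arr : List Int) (found : Bool) (pr pc : Int),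
    (jt - j0).toNat = k → 0 ≤ i → 0 ≤ j0 → j0 ≤ jt → jt < n →
    (found = true → pr = i ∧ 0 ≤ pc ∧ pc < j0) →
    (i + 1) * n ≤ (arr.length : Int) →
    PySem.List.pyGetD ((PySem.List.pyRange j0 n 1).foldl (rBody n matrix i) (arr, found, pr, pc)).1 (i * n + jt) (-1) =
      if pvGet matrix i jt then rightVal n matrix i jt else -1 := by
  induction k with
  | zero =>
    intro j0 jt arr found pr pc hk hi hj0 hle hjn hinv hlen
    have hjj : j0 = jt := by omega
    subst hjj
    have hwr : i * n + j0 < (arr.length : Int) := by nlinarith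
    have ht0 : 0 ≤ i * n + j0 := by nlinarith
    rw [PySem.List.pyRange_one_cons (show j0 < n by omega), List.foldl_cons]
    simp only [rBody]
    by_cases hg : pvGet matrix i j0 = true
    · simp only [hg, beq_self_eq_true, if_true]
      by_cases hf : found = true
      · obtain ⟨hpr, hpc0, hpclt⟩ := hinv hf
        simp only [hf, if_true, hpr]
        rw [r_past n matrix i (n - (j0 + 1)).toNat (j0 + 1) j0 _ true i j0 rfl hi (by omega)
            (by omega) (by omega) (fun _ => ⟨rfl, by omega, by omega⟩)
            (by rw [PySem.List.length_pySetD, PySem.List.length_pySetD]; exact hlen)]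
        simp only [and_self, if_true, hg]
        have h1 : i * n + j0 ≠ i * n + j0 + -(i * n) - j0 + (i * n + pc) := by omega
        rw [rightVal]
        rw [getD_setD_ne _ _ _ _ (by nlinarith) ht0 (by omega),
            getD_setD _ _ _ _ (by nlinarith) (by exact_mod_cast hwr) ht0]
        simp
      · simp only [hf, Bool.false_eq_true, if_false]
        rw [r_past n matrix i (n - (j0 + 1)).toNat (j0 + 1) j0 _ true i j0 rfl hi (by omega)
            (by omega) (by omega) (fun _ => ⟨rfl, by omega, by omega⟩)
            (by rw [PySem.List.length_pySetD]; exact hlen)]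
        simp only [and_self, if_true, hg]
        rw [rightVal]
        rw [getD_setD _ _ _ _ (by nlinarith) (by exact_mod_cast hwr) ht0]
        simp
    · rw [Bool.not_eq_true] at hg
      simp only [beq_iff_eq, hg, Bool.false_eq_true, if_false]
      rw [r_past n matrix i (n - (j0 + 1)).toNat (j0 + 1) j0 _ found pr pc rfl hi (by omega)
          (by omega) (by omega)
          (fun h => by obtain ⟨a, b, c⟩ := hinv h; exact ⟨a, b, by omega⟩)
          (by rw [PySem.List.length_pySetD]; exact hlen)]
      have hc : ¬ (found = true ∧ pc = j0) := by
        rintro ⟨hf, hpc⟩; obtain ⟨_, _, h⟩ := hinv hf; omega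
      simp only [hc, if_false]
      rw [getD_setD _ _ _ _ (by nlinarith) (by exact_mod_cast hwr) ht0]
      simp [hg]
  | succ k ih =>
    intro j0 jt arr found pr pc hk hi hj0 hle hjn hinv hlen
    have hlt : j0 < jt := by omega
    rw [PySem.List.pyRange_one_cons (show j0 < n by omega), List.foldl_cons]
    simp only [rBody]
    by_cases hg : pvGet matrix i j0 = true
    · simp only [hg, beq_self_eq_true, if_true]
      by_cases hf : found = true
      · obtain ⟨hpr, hpc0, hpclt⟩ := hinv hf
        simp only [hf, if_true, hpr]
        exact ih (j0 + 1) jt _ true i j0 (by omega) hi (by omega) (by omega) hjn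
          (fun _ => ⟨rfl, by omega, by omega⟩)
          (by rw [PySem.List.length_pySetD, PySem.List.length_pySetD]; exact hlen)
      · simp only [hf, Bool.false_eq_true, if_false]
        exact ih (j0 + 1) jt _ true i j0 (by omega) hi (by omega) (by omega) hjn
          (fun _ => ⟨rfl, by omega, by omega⟩)
          (by rw [PySem.List.length_pySetD]; exact hlen)
    · rw [Bool.not_eq_true] at hg
      simp only [beq_iff_eq, hg, Bool.false_eq_true, if_false]
      exact ih (j0 + 1) jt _ found pr pc (by omega) hi (by omega) (by omega) hjn
        (fun h => by obtain ⟨a, b, c⟩ := hinv h; exact ⟨a, b, by omega⟩)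
        (by rw [PySem.List.length_pySetD]; exact hlen)

theorem r_frame (n : Int) (matrix : List (List Bool)) (i : Int) (d : Int) (k : Nat) :
    ∀ (j0 t : Int) (arr : List Int) (found : Bool) (pr pc : Int),
    (n - j0).toNat = k → 0 ≤ i → 0 ≤ j0 → 0 ≤ t →
    (∀ x : Int, 0 ≤ x → x < n → t ≠ i * n + x) →
    (found = true → pr = i ∧ 0 ≤ pc ∧ pc < n) →
    PySem.List.pyGetD ((PySem.List.pyRange j0 n 1).foldl (rBody n matrix i) (arr, found, pr, pc)).1 t d =
      PySem.List.pyGetD arr t d := by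
  induction k with
  | zero =>
    intro j0 t arr found pr pc hk hi hj0 ht0 hnot hinv
    rw [PySem.List.pyRange_one_eq_nil (by omega)]
    rfl
  | succ k ih =>
    intro j0 t arr found pr pc hk hi hj0 ht0 hnot hinv
    have hj0n : j0 < n := by omega
    rw [PySem.List.pyRange_one_cons hj0n, List.foldl_cons]
    simp only [rBody]
    by_cases hg : pvGet matrix i j0 = true
    · simp only [hg, beq_self_eq_true, if_true]
      by_cases hf : found = true
      · obtain ⟨hpr, hpc0, hpclt⟩ := hinv hf
        simp only [hf, if_true, hpr]
        rw [ih (j0 + 1) t _ true i j0 (by omega) hi (by omega) ht0 hnot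
            (fun _ => ⟨rfl, by omega, by omega⟩)]
        rw [getD_setD_ne _ _ _ _ (by nlinarith) ht0 (hnot pc hpc0 hpclt),
            getD_setD_ne _ _ _ _ (by nlinarith) ht0 (hnot j0 hj0 hj0n)]
      · simp only [hf, Bool.false_eq_true, if_false]
        rw [ih (j0 + 1) t _ true i j0 (by omega) hi (by omega) ht0 hnot
            (fun _ => ⟨rfl, by omega, by omega⟩)]
        rw [getD_setD_ne _ _ _ _ (by nlinarith) ht0 (hnot j0 hj0 hj0n)]
    · rw [Bool.not_eq_true] at hg
      simp only [beq_iff_eq, hg, Bool.false_eq_true, if_false]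
      rw [ih (j0 + 1) t _ found pr pc (by omega) hi (by omega) ht0 hnot hinv]
      rw [getD_setD_ne _ _ _ _ (by nlinarith) ht0 (hnot j0 hj0 hj0n)]

theorem r_rows_frame (n : Int) (matrix : List (List Bool)) (d : Int) (k : Nat) :
    ∀ (r1 m t : Int) (arr : List Int),
    (m - r1).toNat = k → 0 ≤ r1 → 0 ≤ t →
    (∀ r x : Int, r1 ≤ r → r < m → 0 ≤ x → x < n → t ≠ r * n + x) →
    PySem.List.pyGetD
      ((PySem.List.pyRange r1 m 1).foldl
        (fun nextOneRight i =>
          ((PySem.List.pyRange 0 n 1).foldl (rBody n matrix i) (nextOneRight, false, 0, 0)).1)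
        arr) t d = PySem.List.pyGetD arr t d := by
  induction k with
  | zero =>
    intro r1 m t arr hk hr1 ht0 hnot
    rw [PySem.List.pyRange_one_eq_nil (show m ≤ r1 by omega)]
    rfl
  | succ k ih =>
    intro r1 m t arr hk hr1 ht0 hnot
    rw [PySem.List.pyRange_one_cons (show r1 < m by omega), List.foldl_cons]
    rw [ih (r1 + 1) m t _ (by omega) (by omega) ht0
        (fun r x h1 h2 h3 h4 => hnot r x (by omega) h2 h3 h4)]
    exact r_frame n matrix r1 d (n - 0).toNat 0 t arr false 0 0 rfl hr1 (by omega) ht0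
      (fun x hx1 hx2 => hnot r1 x (by omega) (by omega) hx1 hx2) (by simp)

theorem r_len' (n : Int) (matrix : List (List Bool)) (i : Int) (st : List Int × Bool × Int × Int) :
    ((PySem.List.pyRange 0 n 1).foldl (rBody n matrix i) st).1.length = st.1.length :=
  r_len n matrix i (n - 0).toNat 0 st rfl

theorem r_outer (n : Int) (matrix : List (List Bool)) (k : Nat) :
    ∀ (r0 m i j : Int) (arr : List Int),
    (m - r0).toNat = k → 0 ≤ r0 → r0 ≤ i → i < m → 0 ≤ j → j < n →
    ((arr.length : Int) = m * n) →
    PySem.List.pyGetD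
      ((PySem.List.pyRange r0 m 1).foldl
        (fun nextOneRight i =>
          ((PySem.List.pyRange 0 n 1).foldl (rBody n matrix i) (nextOneRight, false, 0, 0)).1)
        arr) (i * n + j) (-1) =
      if pvGet matrix i j then rightVal n matrix i j else -1 := by
  induction k with
  | zero =>
    intro r0 m i j arr hk hr0 hri him hj0 hjn hlen
    omega
  | succ k ih =>
    intro r0 m i j arr hk hr0 hri him hj0 hjn hlen
    have hn : 0 < n := by omega
    have hi0 : 0 ≤ i := by omega
    have ht0 : 0 ≤ i * n + j := by nlinarith
    rw [PySem.List.pyRange_one_cons (show r0 < m by omega), List.foldl_cons]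
    by_cases hcase : r0 = i
    · subst hcase
      rw [r_rows_frame n matrix (-1) (m - (r0 + 1)).toNat (r0 + 1) m _ _ rfl (by omega) ht0
          (fun r x hr1 hr2 hx1 hx2 heq => by
            have h1 : r0 * n + j < (r0 + 1) * n := by nlinarith
            have h2 : (r0 + 1) * n ≤ r * n := by nlinarith
            linarith)]
      exact r_main n matrix r0 (j - 0).toNat 0 j arr false 0 0 (by omega) hr0 (by omega)
        (by omega) hjn (by simp) (by nlinarith)
    · rw [ih (r0 + 1) m i j _ (by omega) (by omega) (by omega) him hj0 hjn
          (by rw [r_len']; exact hlen)]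

theorem cell_inj {n i j i' j' : Int} (hj : 0 ≤ j) (hjn : j < n) (hj' : 0 ≤ j') (hj'n : j' < n)
    (h : i * n + j = i' * n + j') : i = i' ∧ j = j' := by
  have hn : 0 < n := lt_of_le_of_lt hj hjn
  have hii : i = i' := by
    rcases lt_trichotomy i i' with hlt | he | hgt
    · nlinarith [mul_le_mul_of_nonneg_right (by omega : i + 1 ≤ i') (le_of_lt hn)]
    · exact he
    · nlinarith [mul_le_mul_of_nonneg_right (by omega : i' + 1 ≤ i) (le_of_lt hn)]
  subst hii
  exact ⟨rfl, by omega⟩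

theorem r_char (m n : Int) (matrix : List (List Bool)) (i j : Int)
    (hi0 : 0 ≤ i) (him : i < m) (hj0 : 0 ≤ j) (hjn : j < n) :
    PySem.List.pyGetD (createNextRightMap m n matrix) (i * n + j) (-1) =
      if pvGet matrix i j then rightVal n matrix i j else -1 := by
  have hn : 0 < n := by omega
  have hm : 0 < m := by omega
  have hmn : 0 ≤ m * n := by positivity
  rw [createNextRightMap]
  exact r_outer n matrix (m - 0).toNat 0 m i j _ (by omega) le_rfl hi0 him hj0 hjn
    (by rw [List.length_replicate]; omega)

theorem col_ne {n a b j : Int} (hj : 0 ≤ j) (hjn : j < n) (hab : a ≠ b) :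
    a * n + j ≠ b * n + j := fun h => hab (cell_inj hj hjn hj hjn h).1

theorem d_len (n : Int) (matrix : List (List Bool)) (j : Int) (k : Nat) :
    ∀ (i0 m : Int) (st : List Int × Bool × Int × Int), (m - i0).toNat = k →
    ((PySem.List.pyRange i0 m 1).foldl (dBody n matrix j) st).1.length = st.1.length := by
  induction k with
  | zero =>
    intro i0 m st hk
    rw [PySem.List.pyRange_one_eq_nil (show m ≤ i0 by omega)]
    rfl
  | succ k ih =>
    intro i0 m st hk
    rw [PySem.List.pyRange_one_cons (show i0 < m by omega), List.foldl_cons]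
    rw [ih (i0 + 1) m _ (by omega)]
    obtain ⟨arr, found, pr, pc⟩ := st
    simp only [dBody]
    split
    · split <;> simp [PySem.List.length_pySetD]
    · simp [PySem.List.length_pySetD]

theorem d_past (m n : Int) (matrix : List (List Bool)) (j : Int) (k : Nat) :
    ∀ (i0 it : Int) (arr : List Int) (found : Bool) (pr pc : Int),
    (m - i0).toNat = k → 0 ≤ j → j < n → 0 ≤ i0 → 0 ≤ it → it < i0 →
    (found = true → pc = j ∧ 0 ≤ pr ∧ pr < i0) →
    m * n ≤ (arr.length : Int) →
    PySem.List.pyGetD ((PySem.List.pyRange i0 m 1).foldl (dBody n matrix j) (arr, found, pr, pc)).1 (it * n + j) (-1) =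
      if found = true ∧ pr = it then
        (match (PySem.List.pyRange i0 m 1).find? (fun i' => pvGet matrix i' j) with
         | some i' => i'
         | none => PySem.List.pyGetD arr (it * n + j) (-1))
      else PySem.List.pyGetD arr (it * n + j) (-1) := by
  induction k with
  | zero =>
    intro i0 it arr found pr pc hk hj hjn hi0 hit hlt hinv hlen
    rw [PySem.List.pyRange_one_eq_nil (show m ≤ i0 by omega)]
    simp only [List.foldl_nil, List.find?_nil]
    split <;> rfl
  | succ k ih =>
    intro i0 it arr found pr pc hk hj hjn hi0 hit hlt hinv hlen
    have hi0m : i0 < m := by omega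
    have hwr : i0 * n + j < (arr.length : Int) := by nlinarith
    have ht0 : 0 ≤ it * n + j := by nlinarith
    rw [PySem.List.pyRange_one_cons hi0m, List.foldl_cons]
    simp only [dBody]
    by_cases hg : pvGet matrix i0 j = true
    · simp only [hg, beq_self_eq_true, if_true]
      by_cases hf : found = true
      · obtain ⟨hpc, hpr0, hprlt⟩ := hinv hf
        have hwp : pr * n + pc < ((PySem.List.pySetD arr (i0 * n + j) (-1)).length : Int) := by
          rw [PySem.List.length_pySetD, hpc]; nlinarith
        simp only [hf, if_true]
        rw [ih (i0 + 1) it _ true i0 j (by omega) hj hjn (by omega) hit (by omega)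
            (fun _ => ⟨rfl, by omega, by omega⟩)
            (by rw [PySem.List.length_pySetD, PySem.List.length_pySetD]; exact hlen)]
        have hne : ¬ (i0 = it) := by omega
        simp only [hne, and_false, if_false]
        rw [getD_setD _ _ _ _ (by rw [hpc]; nlinarith) hwp ht0,
            getD_setD _ _ _ _ (by nlinarith) (by exact_mod_cast hwr) ht0]
        have h2 : ¬ (it * n + j = i0 * n + j) := col_ne hj hjn (by omega)
        rw [List.find?_cons_of_pos (by simpa using hg)]
        simp only [h2, if_false]
        by_cases hc : pr = it
        · have h1 : it * n + j = pr * n + pc := by rw [hpc, hc]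
          simp [h1, hc, hf]
        · have h1 : ¬ (it * n + j = pr * n + pc) := by
            rw [hpc]; exact col_ne hj hjn (by omega)
          simp [h1, hc, hf]
      · simp only [hf, Bool.false_eq_true, if_false]
        rw [ih (i0 + 1) it _ true i0 j (by omega) hj hjn (by omega) hit (by omega)
            (fun _ => ⟨rfl, by omega, by omega⟩)
            (by rw [PySem.List.length_pySetD]; exact hlen)]
        have hne : ¬ (i0 = it) := by omega
        simp only [hne, and_false, if_false]
        rw [getD_setD _ _ _ _ (by nlinarith) (by exact_mod_cast hwr) ht0]
        have h2 : ¬ (it * n + j = i0 * n + j) := col_ne hj hjn (by omega)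
        simp only [h2, if_false]
        rw [List.find?_cons_of_pos (by simpa using hg)]
        simp [hf]
    · rw [Bool.not_eq_true] at hg
      simp only [beq_iff_eq, hg, Bool.false_eq_true, if_false]
      rw [ih (i0 + 1) it _ found pr pc (by omega) hj hjn (by omega) hit (by omega)
          (fun h => by obtain ⟨a, b, c⟩ := hinv h; exact ⟨a, b, by omega⟩)
          (by rw [PySem.List.length_pySetD]; exact hlen)]
      rw [getD_setD _ _ _ _ (by nlinarith) (by exact_mod_cast hwr) ht0]
      have h2 : ¬ (it * n + j = i0 * n + j) := col_ne hj hjn (by omega)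
      simp only [h2, if_false]
      rw [List.find?_cons_of_neg (by simp [pvGet] at hg ⊢; simp [hg])]

theorem d_main (m n : Int) (matrix : List (List Bool)) (j : Int) (k : Nat) :
    ∀ (i0 it : Int) (arr : List Int) (found : Bool) (pr pc : Int),
    (it - i0).toNat = k → 0 ≤ j → j < n → 0 ≤ i0 → i0 ≤ it → it < m →
    (found = true → pc = j ∧ 0 ≤ pr ∧ pr < i0) →
    m * n ≤ (arr.length : Int) →
    PySem.List.pyGetD ((PySem.List.pyRange i0 m 1).foldl (dBody n matrix j) (arr, found, pr, pc)).1 (it * n + j) (-1) =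
      if pvGet matrix it j then downVal m matrix it j else -1 := by
  induction k with
  | zero =>
    intro i0 it arr found pr pc hk hj hjn hi0 hle him hinv hlen
    have hii : i0 = it := by omega
    subst hii
    have hwr : i0 * n + j < (arr.length : Int) := by nlinarith
    have ht0 : 0 ≤ i0 * n + j := by nlinarith
    rw [PySem.List.pyRange_one_cons (show i0 < m by omega), List.foldl_cons]
    simp only [dBody]
    by_cases hg : pvGet matrix i0 j = true
    · simp only [hg, beq_self_eq_true, if_true]
      by_cases hf : found = true
      · obtain ⟨hpc, hpr0, hprlt⟩ := hinv hf
        simp only [hf, if_true]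
        rw [d_past m n matrix j (m - (i0 + 1)).toNat (i0 + 1) i0 _ true i0 j rfl hj hjn
            (by omega) (by omega) (by omega) (fun _ => ⟨rfl, by omega, by omega⟩)
            (by rw [PySem.List.length_pySetD, PySem.List.length_pySetD]; exact hlen)]
        simp only [and_self, if_true, hg]
        rw [downVal]
        rw [getD_setD_ne _ _ _ _ (by rw [hpc]; nlinarith) ht0
              (by rw [hpc]; exact col_ne hj hjn (by omega)),
            getD_setD _ _ _ _ (by nlinarith) (by exact_mod_cast hwr) ht0]
        simp
      · simp only [hf, Bool.false_eq_true, if_false]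
        rw [d_past m n matrix j (m - (i0 + 1)).toNat (i0 + 1) i0 _ true i0 j rfl hj hjn
            (by omega) (by omega) (by omega) (fun _ => ⟨rfl, by omega, by omega⟩)
            (by rw [PySem.List.length_pySetD]; exact hlen)]
        simp only [and_self, if_true, hg]
        rw [downVal]
        rw [getD_setD _ _ _ _ (by nlinarith) (by exact_mod_cast hwr) ht0]
        simp
    · rw [Bool.not_eq_true] at hg
      simp only [beq_iff_eq, hg, Bool.false_eq_true, if_false]
      rw [d_past m n matrix j (m - (i0 + 1)).toNat (i0 + 1) i0 _ found pr pc rfl hj hjn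
          (by omega) (by omega) (by omega)
          (fun h => by obtain ⟨a, b, c⟩ := hinv h; exact ⟨a, b, by omega⟩)
          (by rw [PySem.List.length_pySetD]; exact hlen)]
      have hc : ¬ (found = true ∧ pr = i0) := by
        rintro ⟨hf, hpr⟩; obtain ⟨_, _, h⟩ := hinv hf; omega
      simp only [hc, if_false]
      rw [getD_setD _ _ _ _ (by nlinarith) (by exact_mod_cast hwr) ht0]
      simp [hg]
  | succ k ih =>
    intro i0 it arr found pr pc hk hj hjn hi0 hle him hinv hlen
    have hlt : i0 < it := by omega
    rw [PySem.List.pyRange_one_cons (show i0 < m by omega), List.foldl_cons]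
    simp only [dBody]
    by_cases hg : pvGet matrix i0 j = true
    · simp only [hg, beq_self_eq_true, if_true]
      by_cases hf : found = true
      · obtain ⟨hpc, hpr0, hprlt⟩ := hinv hf
        simp only [hf, if_true]
        exact ih (i0 + 1) it _ true i0 j (by omega) hj hjn (by omega) (by omega) him
          (fun _ => ⟨rfl, by omega, by omega⟩)
          (by rw [PySem.List.length_pySetD, PySem.List.length_pySetD]; exact hlen)
      · simp only [hf, Bool.false_eq_true, if_false]
        exact ih (i0 + 1) it _ true i0 j (by omega) hj hjn (by omega) (by omega) him
          (fun _ => ⟨rfl, by omega, by omega⟩)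
          (by rw [PySem.List.length_pySetD]; exact hlen)
    · rw [Bool.not_eq_true] at hg
      simp only [beq_iff_eq, hg, Bool.false_eq_true, if_false]
      exact ih (i0 + 1) it _ found pr pc (by omega) hj hjn (by omega) (by omega) him
        (fun h => by obtain ⟨a, b, c⟩ := hinv h; exact ⟨a, b, by omega⟩)
        (by rw [PySem.List.length_pySetD]; exact hlen)

theorem d_frame (m n : Int) (matrix : List (List Bool)) (j : Int) (d : Int) (k : Nat) :
    ∀ (i0 t : Int) (arr : List Int) (found : Bool) (pr pc : Int),
    (m - i0).toNat = k → 0 ≤ j → j < n → 0 ≤ i0 → 0 ≤ t →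
    (∀ r : Int, 0 ≤ r → r < m → t ≠ r * n + j) →
    (found = true → pc = j ∧ 0 ≤ pr ∧ pr < m) →
    PySem.List.pyGetD ((PySem.List.pyRange i0 m 1).foldl (dBody n matrix j) (arr, found, pr, pc)).1 t d =
      PySem.List.pyGetD arr t d := by
  induction k with
  | zero =>
    intro i0 t arr found pr pc hk hj hjn hi0 ht0 hnot hinv
    rw [PySem.List.pyRange_one_eq_nil (show m ≤ i0 by omega)]
    rfl
  | succ k ih =>
    intro i0 t arr found pr pc hk hj hjn hi0 ht0 hnot hinv
    have hi0m : i0 < m := by omega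
    rw [PySem.List.pyRange_one_cons hi0m, List.foldl_cons]
    simp only [dBody]
    by_cases hg : pvGet matrix i0 j = true
    · simp only [hg, beq_self_eq_true, if_true]
      by_cases hf : found = true
      · obtain ⟨hpc, hpr0, hprlt⟩ := hinv hf
        simp only [hf, if_true]
        rw [ih (i0 + 1) t _ true i0 j (by omega) hj hjn (by omega) ht0 hnot
            (fun _ => ⟨rfl, by omega, by omega⟩)]
        rw [getD_setD_ne _ _ _ _ (by rw [hpc]; nlinarith) ht0
              (by rw [hpc]; exact hnot pr hpr0 hprlt),
            getD_setD_ne _ _ _ _ (by nlinarith) ht0 (hnot i0 hi0 hi0m)]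
      · simp only [hf, Bool.false_eq_true, if_false]
        rw [ih (i0 + 1) t _ true i0 j (by omega) hj hjn (by omega) ht0 hnot
            (fun _ => ⟨rfl, by omega, by omega⟩)]
        rw [getD_setD_ne _ _ _ _ (by nlinarith) ht0 (hnot i0 hi0 hi0m)]
    · rw [Bool.not_eq_true] at hg
      simp only [beq_iff_eq, hg, Bool.false_eq_true, if_false]
      rw [ih (i0 + 1) t _ found pr pc (by omega) hj hjn (by omega) ht0 hnot hinv]
      rw [getD_setD_ne _ _ _ _ (by nlinarith) ht0 (hnot i0 hi0 hi0m)]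

theorem d_cols_frame (m n : Int) (matrix : List (List Bool)) (d : Int) (k : Nat) :
    ∀ (j1 t : Int) (arr : List Int),
    (n - j1).toNat = k → 0 ≤ j1 → 0 ≤ t →
    (∀ r jc : Int, 0 ≤ r → r < m → j1 ≤ jc → jc < n → t ≠ r * n + jc) →
    PySem.List.pyGetD
      ((PySem.List.pyRange j1 n 1).foldl
        (fun nextOneDown j =>
          ((PySem.List.pyRange 0 m 1).foldl (dBody n matrix j) (nextOneDown, false, 0, 0)).1)
        arr) t d = PySem.List.pyGetD arr t d := by
  induction k with
  | zero =>
    intro j1 t arr hk hj1 ht0 hnot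
    rw [PySem.List.pyRange_one_eq_nil (show n ≤ j1 by omega)]
    rfl
  | succ k ih =>
    intro j1 t arr hk hj1 ht0 hnot
    have hj1n : j1 < n := by omega
    rw [PySem.List.pyRange_one_cons hj1n, List.foldl_cons]
    rw [ih (j1 + 1) t _ (by omega) (by omega) ht0
        (fun r jc h1 h2 h3 h4 => hnot r jc h1 h2 (by omega) h4)]
    exact d_frame m n matrix j1 d (m - 0).toNat 0 t arr false 0 0 rfl hj1 hj1n (by omega) ht0
      (fun r hr1 hr2 => hnot r j1 hr1 hr2 (by omega) hj1n) (by simp)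

theorem d_len' (m n : Int) (matrix : List (List Bool)) (j : Int) (st : List Int × Bool × Int × Int) :
    ((PySem.List.pyRange 0 m 1).foldl (dBody n matrix j) st).1.length = st.1.length :=
  d_len n matrix j (m - 0).toNat 0 m st rfl

theorem d_outer (m n : Int) (matrix : List (List Bool)) (k : Nat) :
    ∀ (c0 i j : Int) (arr : List Int),
    (n - c0).toNat = k → 0 ≤ c0 → c0 ≤ j → j < n → 0 ≤ i → i < m →
    ((arr.length : Int) = m * n) →
    PySem.List.pyGetD
      ((PySem.List.pyRange c0 n 1).foldl
        (fun nextOneDown j =>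
          ((PySem.List.pyRange 0 m 1).foldl (dBody n matrix j) (nextOneDown, false, 0, 0)).1)
        arr) (i * n + j) (-1) =
      if pvGet matrix i j then downVal m matrix i j else -1 := by
  induction k with
  | zero =>
    intro c0 i j arr hk hc0 hcj hjn hi0 him hlen
    omega
  | succ k ih =>
    intro c0 i j arr hk hc0 hcj hjn hi0 him hlen
    have hn : 0 < n := by omega
    have hm : 0 < m := by omega
    have ht0 : 0 ≤ i * n + j := by nlinarith
    rw [PySem.List.pyRange_one_cons (show c0 < n by omega), List.foldl_cons]
    by_cases hcase : c0 = j
    · subst hcase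
      rw [d_cols_frame m n matrix (-1) (n - (c0 + 1)).toNat (c0 + 1) _ _ rfl (by omega) ht0
          (fun r jc hr1 hr2 hc1 hc2 heq => by
            have := (cell_inj (by omega : (0:Int) ≤ c0) (by omega) (by omega : (0:Int) ≤ jc) hc2 heq).2
            omega)]
      exact d_main m n matrix c0 (i - 0).toNat 0 i arr false 0 0 (by omega) hc0 (by omega)
        (by omega) (by omega) him (by simp) (by omega)
    · rw [ih (c0 + 1) i j _ (by omega) (by omega) (by omega) hjn hi0 him
          (by rw [d_len']; exact hlen)]

theorem d_char (m n : Int) (matrix : List (List Bool)) (i j : Int)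
    (hi0 : 0 ≤ i) (him : i < m) (hj0 : 0 ≤ j) (hjn : j < n) :
    PySem.List.pyGetD (createNextDownMap m n matrix) (i * n + j) (-1) =
      if pvGet matrix i j then downVal m matrix i j else -1 := by
  have hm : 0 < m := by omega
  have hn : 0 < n := by omega
  have hmn : 0 ≤ m * n := by positivity
  rw [createNextDownMap]
  exact d_outer m n matrix (n - 0).toNat 0 i j _ (by omega) le_rfl hj0 hjn hi0 him
    (by rw [List.length_replicate]; omega)

-- ===== VERDICT (by name: the statement is the Claim_ definition above) =====
theorem lemma2Exists_spec : Claim_equal_lemma2Exists := by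
  intro m n matrix _ _
  unfold Spec_lemma2Exists
  simp only [lemma2Exists, lemma2Exists_alt]
  apply PySem.List.any_congr_mem
  intro topRow htR
  apply PySem.List.any_congr_mem
  intro leftCol hlC
  rw [PySem.List.mem_pyRange_one] at htR hlC
  obtain ⟨ht0, htm⟩ := htR
  obtain ⟨hl0, hln⟩ := hlC
  by_cases hA : pvGet matrix topRow leftCol = true
  · simp only [hA, beq_self_eq_true, if_true, Bool.true_and]
    rw [d_char m n matrix topRow leftCol ht0 htm hl0 hln, hA]
    simp only [if_true, downVal]
    cases hfd : (PySem.List.pyRange (topRow + 1) m 1).find? (fun i' => pvGet matrix i' leftCol) with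
    | none => simp
    | some b =>
      have hbmem := List.mem_of_find?_eq_some hfd
      rw [PySem.List.mem_pyRange_one] at hbmem
      have hbp : pvGet matrix b leftCol = true := by simpa using List.find?_some hfd
      have hbne : (b != -1) = true := by simp [bne_iff_ne]; omega
      simp only [hbne, hbp, beq_self_eq_true, Bool.and_self, if_true]
      rw [r_char m n matrix b leftCol (by omega) (by omega) hl0 hln, hbp]
      simp only [if_true, rightVal]
      cases hfr : (PySem.List.pyRange (leftCol + 1) n 1).find? (fun j' => pvGet matrix b j') with
      | none => simp
      | some r =>
        have hrmem := List.mem_of_find?_eq_some hfr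
        rw [PySem.List.mem_pyRange_one] at hrmem
        have hrp : pvGet matrix b r = true := by simpa using List.find?_some hfr
        have hrne : (r != -1) = true := by simp [bne_iff_ne]; omega
        simp [hrne, hrp]
  · rw [Bool.not_eq_true] at hA
    simp [hA]
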